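-- pv_equiv track=rewrite | github.com/Meredithhelipigeon/Interview | Coding/2444/countSubarrays.py | countSubarrays4
-- ===== SOURCE A (Python) =====
-- from typing import List
--
-- def countSubarrays4(nums: List[int], minK: int, maxK: int) -> int:
--     start = 0
--     mostRecentMinK = mostRecentMaxK = -1
--     ret = 0
--
--     for i in range(len(nums)):
--         if nums[i]<minK or nums[i]>maxK:
--             start=i+1
--         else:
--             if nums[i]==minK: mostRecentMinK=i
--             if nums[i]==maxK: mostRecentMaxK=i
--             ret += (i-start+1)- (i-max(min(mostRecentMinK,mostRecentMaxK), start-1))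
--     return ret
-- ===== SOURCE B (Python) =====
-- from typing import List
--
-- def countSubarrays4(nums: List[int], minK: int, maxK: int) -> int:
--     # Inclusion-exclusion over maximal in-range runs instead of a sliding window.
--     def tri(L):
--         return L * (L + 1) // 2
--
--     def gaps(run, pred):
--         # sum of tri(g) over maximal gaps of run whose elements all fail pred
--         total = g = 0
--         for x in run:
--             if pred(x):
--                 total += tri(g)
--                 g = 0
--             else:
--                 g += 1
--         return total + tri(g)
--
--     n = len(nums)
--     ans = 0
--     i = 0
--     while i < n:
--         if not (minK <= nums[i] <= maxK):
--             i += 1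
--             continue
--         j = i
--         while j < n and minK <= nums[j] <= maxK:
--             j += 1
--         run = nums[i:j]
--         ans += (tri(j - i)
--                 - gaps(run, lambda x: x == minK)
--                 - gaps(run, lambda x: x == maxK)
--                 + gaps(run, lambda x: x == minK or x == maxK))
--         i = j
--     return ans
-- ===== Notes on version B (the rewrite author's own statement) =====
-- stated objective: alternative
-- what changed: Replaces the sliding window with last-seen-index state by splitting nums into maximal in-range runs and counting each run's subarrays by inclusion-exclusion over triangular numbers of gap lengths (total - no-minK - no-maxK + neither).
import Mathlib
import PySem

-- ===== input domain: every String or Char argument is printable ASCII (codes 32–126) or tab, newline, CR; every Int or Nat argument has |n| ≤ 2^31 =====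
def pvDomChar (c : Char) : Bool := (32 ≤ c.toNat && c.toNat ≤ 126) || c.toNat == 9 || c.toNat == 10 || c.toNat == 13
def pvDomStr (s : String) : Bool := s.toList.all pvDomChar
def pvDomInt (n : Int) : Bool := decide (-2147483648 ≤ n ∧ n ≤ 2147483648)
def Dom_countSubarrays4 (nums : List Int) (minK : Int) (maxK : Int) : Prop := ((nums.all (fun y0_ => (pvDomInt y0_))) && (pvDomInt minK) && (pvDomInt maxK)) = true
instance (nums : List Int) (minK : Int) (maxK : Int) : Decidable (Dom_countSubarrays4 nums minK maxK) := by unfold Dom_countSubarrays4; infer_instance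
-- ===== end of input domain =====

-- B replaces A's sliding window (last-seen indices) by inclusion-exclusion over maximal
-- in-range runs and their gaps (objective: alternative algorithm, same cost).

-- ===== PORT A =====
-- the for-loop over range(len(nums)) as structural recursion carrying the index i and the
-- state (start, mostRecentMinK, mostRecentMaxK, ret)
def aLoop (minK maxK : Int) : List Int → Int → (Int × Int × Int × Int) → (Int × Int × Int × Int)
  | [], _, st => st
  | x :: xs, i, (start, mMin, mMax, ret) =>
    if x < minK ∨ x > maxK then
      aLoop minK maxK xs (i + 1) (i + 1, mMin, mMax, ret)
    else
      let mMin' := if x = minK then i else mMin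
      let mMax' := if x = maxK then i else mMax
      aLoop minK maxK xs (i + 1)
        (start, mMin', mMax', ret + ((i - start + 1) - (i - max (min mMin' mMax') (start - 1))))

def countSubarrays4 (nums : List Int) (minK : Int) (maxK : Int) : Int :=
  (aLoop minK maxK nums 0 (0, -1, -1, 0)).2.2.2

-- ===== PORT B =====
def bTri (n : Int) : Int := PySem.Int.floordiv (n * (n + 1)) 2

-- B's gaps(run, pred) loop: sum of tri(g) over maximal pred-free gaps
def bGaps (p : Int → Bool) : List Int → Int → Int
  | [], g => bTri g
  | x :: xs, g => if p x then bTri g + bGaps p xs 0 else bGaps p xs (g + 1)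

def bInb (minK maxK x : Int) : Bool := decide (minK ≤ x) && decide (x ≤ maxK)

-- B's outer while loop: peel one maximal in-range run at a time (takeWhile/dropWhile = the
-- scan to j and the slice nums[i:j])
def bRuns (minK maxK : Int) : List Int → Int
  | [] => 0
  | x :: xs =>
    if bInb minK maxK x then
      let run := (x :: xs).takeWhile (bInb minK maxK)
      (bTri (run.length : Int)
        - bGaps (fun y => y == minK) run 0
        - bGaps (fun y => y == maxK) run 0
        + bGaps (fun y => y == minK || y == maxK) run 0)
        + bRuns minK maxK ((x :: xs).dropWhile (bInb minK maxK))
    else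
      bRuns minK maxK xs
termination_by l => l.length
decreasing_by
  · have h := List.length_dropWhile_le (bInb minK maxK) xs
    simp_all
  · simp

def countSubarrays4_alt (nums : List Int) (minK : Int) (maxK : Int) : Int :=
  bRuns minK maxK nums

-- ===== PRECONDITION & SPEC =====
def Spec_countSubarrays4 (nums : List Int) (minK : Int) (maxK : Int) (out : Int) : Prop := out = countSubarrays4_alt nums minK maxK
instance (nums : List Int) (minK : Int) (maxK : Int) (out : Int) : Decidable (Spec_countSubarrays4 nums minK maxK out) := by unfold Spec_countSubarrays4; infer_instance

-- ===== CLAIM (what is proved, stated in full; the proofs are below) =====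
def Claim_equal_countSubarrays4 : Prop := ∀ (nums : List Int) (minK : Int) (maxK : Int), Dom_countSubarrays4 nums minK maxK → Spec_countSubarrays4 nums minK maxK (countSubarrays4 nums minK maxK)

-- ===== LEMMAS AND PROOFS =====

-- pointwise gap sums: S p xs g = Σ over elements of (distance since the last p-element),
-- starting g elements into a gap
def S (p : Int → Bool) : List Int → Int → Int
  | [], _ => 0
  | x :: xs, g => if p x then S p xs 0 else (g + 1) + S p xs (g + 1)

lemma bTri_succ (g : Int) : bTri (g + 1) = bTri g + (g + 1) := by
  obtain ⟨k, hk⟩ : ∃ k, g * (g + 1) = 2 * k := by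
    rcases Int.even_mul_succ_self g with ⟨k, hk⟩; exact ⟨k, by omega⟩
  have h2 : (g + 1) * (g + 1 + 1) = 2 * (k + (g + 1)) := by linear_combination hk
  rw [bTri, bTri, hk, h2, PySem.Int.floordiv_eq_ediv_of_pos (by norm_num),
    PySem.Int.floordiv_eq_ediv_of_pos (by norm_num),
    Int.mul_ediv_cancel_left _ (by norm_num), Int.mul_ediv_cancel_left _ (by norm_num)]

lemma bTri_zero : bTri 0 = 0 := by decide

lemma bGaps_eq_S (p : Int → Bool) : ∀ (xs : List Int) (g : Int),
    bGaps p xs g = S p xs g + bTri g := by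
  intro xs
  induction xs with
  | nil => intro g; simp [bGaps, S]
  | cons x xs ih =>
    intro g
    by_cases h : p x = true
    · simp [bGaps, S, h, ih, bTri_zero]; ring
    · simp only [Bool.not_eq_true] at h
      simp [bGaps, S, h, ih, bTri_succ]; ring

lemma S_false (xs : List Int) : ∀ g : Int, S (fun _ => false) xs g = bTri (g + xs.length) - bTri g := by
  induction xs with
  | nil => intro g; simp [S]
  | cons x xs ih =>
    intro g
    simp only [S, ih, List.length_cons]
    have := bTri_succ g
    push_cast
    have h2 : (g + 1) + (xs.length : Int) = g + ((xs.length : Int) + 1) := by ring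
    rw [h2] at *
    omega

lemma aLoop_append (minK maxK : Int) : ∀ (xs ys : List Int) (i : Int) (st : Int × Int × Int × Int),
    aLoop minK maxK (xs ++ ys) i st = aLoop minK maxK ys (i + xs.length) (aLoop minK maxK xs i st) := by
  intro xs
  induction xs with
  | nil => intro ys i st; simp [aLoop]
  | cons x xs ih =>
    intro ys i st
    obtain ⟨s, m, M, r⟩ := st
    simp only [List.cons_append, aLoop, List.length_cons]
    have hidx : i + ((xs.length : Int) + 1) = (i + 1) + (xs.length : Int) := by ring
    push_cast
    rw [hidx]
    split_ifs <;> rw [ih]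

-- processing a run of all in-range elements: start never moves, ret grows by the four
-- pointwise gap sums, and the last-seen indices stay below the current index
lemma aLoop_run (minK maxK : Int) : ∀ (xs : List Int), (∀ x ∈ xs, bInb minK maxK x = true) →
    ∀ (i s m M r : Int), s ≤ i → m < i → M < i →
    ∃ fm fM, aLoop minK maxK xs i (s, m, M, r) =
      (s, fm, fM, r + (S (fun _ => false) xs (i - s)
        - S (fun y => y == minK) xs (i - 1 - max m (s - 1))
        - S (fun y => y == maxK) xs (i - 1 - max M (s - 1))
        + S (fun y => y == minK || y == maxK) xs (i - 1 - max (max m M) (s - 1))))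
      ∧ fm < i + xs.length ∧ fM < i + xs.length := by
  intro xs
  induction xs with
  | nil =>
    intro _ i s m M r hs hm hM
    refine ⟨m, M, ?_, by simpa using hm, by simpa using hM⟩
    simp [aLoop, S]
  | cons x xs ih =>
    intro hall i s m M r hs hm hM
    have hx : bInb minK maxK x = true := hall x (by simp)
    have hx' : minK ≤ x ∧ x ≤ maxK := by
      simpa [bInb, Bool.and_eq_true, decide_eq_true_eq] using hx
    have hcond : ¬ (x < minK ∨ x > maxK) := by omega
    simp only [aLoop, if_neg hcond]
    set m' : Int := if x = minK then i else m with hm'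
    set M' : Int := if x = maxK then i else M with hM'
    have hm'lt : m' < i + 1 := by rw [hm']; split <;> omega
    have hM'lt : M' < i + 1 := by rw [hM']; split <;> omega
    obtain ⟨fm, fM, heq, hfm, hfM⟩ :=
      ih (fun y hy => hall y (by simp [hy]))
        (i + 1) s m' M' (r + ((i - s + 1) - (i - max (min m' M') (s - 1))))
        (by omega) hm'lt hM'lt
    refine ⟨fm, fM, ?_, by simp only [List.length_cons]; push_cast; push_cast at hfm; omega, by simp only [List.length_cons]; push_cast; push_cast at hfM; omega⟩
    rw [heq]
    refine congrArg (fun t => (s, fm, fM, t)) ?_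
    by_cases h1 : x = minK <;> by_cases h2 : x = maxK
    · -- x = minK and x = maxK
      subst h1
      rw [hm', hM']
      rw [show (if x = x then i else m) = i from if_pos rfl, show (if x = maxK then i else M) = i from if_pos h2]
      simp only [S, h2, beq_self_eq_true, Bool.or_self, if_true, min_self, max_self, Bool.false_eq_true, if_false]
      rw [show max i (s - 1) = i by omega]
      rw [show i + 1 - s = i - s + 1 by ring, show i + 1 - 1 - i = (0:Int) by ring]
      omega
    · -- x = minK only
      subst h1
      rw [hm', hM']
      rw [show (if x = x then i else m) = i from if_pos rfl, show (if x = maxK then i else M) = M from if_neg h2]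
      simp only [S, beq_self_eq_true, beq_iff_eq, h2, Bool.or_eq_true, true_or, if_true,
        if_false, eq_self_iff_true, or_false, false_or, Bool.false_eq_true]
      rw [show max i (s - 1) = i by omega, show max (max i M) (s - 1) = i by omega]
      rw [show i + 1 - s = i - s + 1 by ring, show i + 1 - 1 - i = (0:Int) by ring,
        show i + 1 - 1 - max M (s - 1) = (i - 1 - max M (s - 1)) + 1 by ring]
      omega
    · -- x = maxK only
      subst h2
      rw [hm', hM']
      rw [show (if x = x then i else M) = i from if_pos rfl, show (if x = minK then i else m) = m from if_neg h1]
      simp only [S, beq_self_eq_true, beq_iff_eq, h1, Bool.or_eq_true, or_true, if_true,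
        if_false, eq_self_iff_true, or_false, false_or, Bool.false_eq_true]
      rw [show max i (s - 1) = i by omega, show max (max m i) (s - 1) = i by omega]
      rw [show i + 1 - s = i - s + 1 by ring, show i + 1 - 1 - i = (0:Int) by ring,
        show i + 1 - 1 - max m (s - 1) = (i - 1 - max m (s - 1)) + 1 by ring]
      omega
    · -- neither
      rw [hm', hM']
      rw [show (if x = minK then i else m) = m from if_neg h1, show (if x = maxK then i else M) = M from if_neg h2]
      simp only [S, beq_iff_eq, h1, h2, Bool.or_eq_true, if_false, or_self, Bool.false_eq_true]
      rw [show i + 1 - s = i - s + 1 by ring,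
        show i + 1 - 1 - max m (s - 1) = (i - 1 - max m (s - 1)) + 1 by ring,
        show i + 1 - 1 - max M (s - 1) = (i - 1 - max M (s - 1)) + 1 by ring,
        show i + 1 - 1 - max (max m M) (s - 1) = (i - 1 - max (max m M) (s - 1)) + 1 by ring]
      omega

lemma dropWhile_head_false (p : Int → Bool) : ∀ (l : List Int) (y : Int) (ys : List Int),
    l.dropWhile p = y :: ys → p y = false := by
  intro l
  induction l with
  | nil => intro y ys h; simp [List.dropWhile] at h
  | cons x xs ih =>
    intro y ys h
    rw [List.dropWhile_cons] at h
    split at h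
    · exact ih y ys h
    · cases h; simp_all

lemma main_lemma (minK maxK : Int) : ∀ (n : Nat) (xs : List Int), xs.length ≤ n →
    ∀ (i m M r : Int), m < i → M < i →
    (aLoop minK maxK xs i (i, m, M, r)).2.2.2 = r + bRuns minK maxK xs := by
  intro n
  induction n with
  | zero =>
    intro xs hlen i m M r _ _
    have : xs = [] := List.length_eq_zero_iff.mp (Nat.le_zero.mp hlen)
    subst this; simp [aLoop, bRuns]
  | succ k ih =>
    intro xs hlen i m M r hm hM
    match xs with
    | [] => simp [aLoop, bRuns]
    | x :: xs =>
      by_cases hx : bInb minK maxK x = true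
      · -- in-range head: peel off the whole run
        set run := (x :: xs).takeWhile (bInb minK maxK) with hrun
        set rest := (x :: xs).dropWhile (bInb minK maxK) with hrest
        have hsplit : run ++ rest = x :: xs := List.takeWhile_append_dropWhile
        have hallrun : ∀ y ∈ run, bInb minK maxK y = true := fun y hy => List.mem_takeWhile_imp hy
        have hxcons : x :: xs = run ++ rest := hsplit.symm
        have hlenrr : run.length + rest.length = xs.length + 1 := by
          have := congrArg List.length hsplit
          simpa using this
        obtain ⟨fm, fM, heq, hfm, hfM⟩ :=
          aLoop_run minK maxK run hallrun i i m M r le_rfl hm hM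
        have hmax_m : max m (i - 1) = i - 1 := by omega
        have hmax_M : max M (i - 1) = i - 1 := by omega
        have hmax_mM : max (max m M) (i - 1) = i - 1 := by omega
        rw [hmax_m, hmax_M, hmax_mM] at heq
        have hbase : i - 1 - (i - 1) = (0 : Int) := by omega
        rw [hbase] at heq
        have hzero : i - i = (0 : Int) := by omega
        rw [hzero] at heq
        -- Δ = contrib run
        have hΔ : S (fun _ => false) run 0
            - S (fun y => y == minK) run 0
            - S (fun y => y == maxK) run 0
            + S (fun y => y == minK || y == maxK) run 0
          = bTri (run.length : Int)
            - bGaps (fun y => y == minK) run 0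
            - bGaps (fun y => y == maxK) run 0
            + bGaps (fun y => y == minK || y == maxK) run 0 := by
          rw [bGaps_eq_S, bGaps_eq_S, bGaps_eq_S, S_false, bTri_zero]
          simp
        have hBr : bRuns minK maxK (x :: xs) =
            (bTri (run.length : Int)
              - bGaps (fun y => y == minK) run 0
              - bGaps (fun y => y == maxK) run 0
              + bGaps (fun y => y == minK || y == maxK) run 0)
            + bRuns minK maxK rest := by
          rw [bRuns]; simp only [hx, if_pos]; rw [← hrun, ← hrest]
        rw [hBr, hxcons, aLoop_append, heq]
        match hr : rest with
        | [] =>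
          simp only [aLoop, bRuns]
          rw [hΔ]; ring
        | y :: ys =>
          have hy : bInb minK maxK y = false := dropWhile_head_false _ _ _ _ hrest.symm
          have hycond : y < minK ∨ y > maxK := by
            simp only [bInb, Bool.and_eq_true, decide_eq_true_eq] at hy
            by_contra hc
            push_neg at hc
            simp [Bool.and_eq_true, decide_eq_true_eq] at hy
            omega
          simp only [aLoop, if_pos hycond]
          have hrunpos : 1 ≤ run.length := by
            rw [hrun]; simp [List.takeWhile_cons, hx]
          have hlys : ys.length ≤ k := by
            simp only [List.length_cons] at hlenrr hlen
            omega
          have := ih ys hlys (i + (run.length : Int) + 1) fm fM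
            (r + (S (fun _ => false) run 0
              - S (fun y => y == minK) run 0
              - S (fun y => y == maxK) run 0
              + S (fun y => y == minK || y == maxK) run 0))
            (by push_cast at hfm ⊢; omega) (by push_cast at hfM ⊢; omega)
          rw [show i + (run.length : Int) + 1 = (i + run.length) + 1 from rfl] at this
          rw [this]
          have hBys : bRuns minK maxK (y :: ys) = bRuns minK maxK ys := by
            rw [bRuns]
            simp [hy]
          rw [hBys, hΔ]
          ring
      · -- out-of-range head
        have hxcond : x < minK ∨ x > maxK := by
          simp only [bInb, Bool.and_eq_true, decide_eq_true_eq] at hx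
          by_contra hc; push_neg at hc; exact hx ⟨by omega, by omega⟩
        simp only [aLoop, if_pos hxcond]
        have hB : bRuns minK maxK (x :: xs) = bRuns minK maxK xs := by
          rw [bRuns]; simp [hx]
        rw [hB]
        exact ih xs (by simpa using Nat.lt_succ_iff.mp (by simpa using hlen)) (i + 1) m M r
          (by omega) (by omega)

-- ===== VERDICT (by name: the statement is the Claim_ definition above) =====
theorem countSubarrays4_spec : Claim_equal_countSubarrays4 := by
  intro nums minK maxK _
  unfold Spec_countSubarrays4 countSubarrays4 countSubarrays4_alt
  have := main_lemma minK maxK nums.length nums le_rfl 0 (-1) (-1) 0 (by omega) (by omega)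
  simpa using this
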